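-- pv_equiv track=rewrite | github.com/trangyp/AMOS-Code | clawspring/amos_multi_agent_coordination_engine.py | byzantine_fault_tolerance
-- ===== SOURCE A (Python) =====
-- from typing import Any, Dict, List, Optional
--
-- def byzantine_fault_tolerance(proposals: Dict[str, Any], f: int) -> Optional[Any]:
--     """BFT consensus for fault-tolerant agreement."""
--     n = len(proposals)
--     if n <= 3 * f:
--         return None  # Cannot guarantee consensus
--     # Count occurrences
--     counts: Dict[Any, int] = {}
--     for proposal in proposals.values():
--         counts[proposal] = counts.get(proposal, 0) + 1
--     # Need n-f agreements
--     threshold = n - f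
--     for proposal, count in counts.items():
--         if count >= threshold:
--             return proposal
--     return None
-- ===== SOURCE B (Python) =====
-- def byzantine_fault_tolerance(proposals, f):
--     """BFT consensus via Boyer-Moore majority vote (no frequency dict)."""
--     n = len(proposals)
--     if n <= 3 * f:
--         return None  # Cannot guarantee consensus
--     candidate = None
--     votes = 0
--     for p in proposals.values():
--         if votes == 0:
--             candidate = p
--             votes = 1
--         elif candidate == p:
--             votes += 1
--         else:
--             votes -= 1
--     if candidate is None:
--         return None
--     occurrences = 0
--     for p in proposals.values():
--         if p == candidate:
--             occurrences += 1
--     if occurrences >= n - f: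
--         return candidate
--     return None
-- ===== Notes on version B (the rewrite author's own statement) =====
-- stated objective: alternative
-- what changed: Replaced the frequency dictionary plus items scan with a Boyer-Moore majority vote (single candidate and counter, then one verification count), exploiting that any proposal reaching threshold n-f is a strict majority element after the n > 3f guard.
import Mathlib
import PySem

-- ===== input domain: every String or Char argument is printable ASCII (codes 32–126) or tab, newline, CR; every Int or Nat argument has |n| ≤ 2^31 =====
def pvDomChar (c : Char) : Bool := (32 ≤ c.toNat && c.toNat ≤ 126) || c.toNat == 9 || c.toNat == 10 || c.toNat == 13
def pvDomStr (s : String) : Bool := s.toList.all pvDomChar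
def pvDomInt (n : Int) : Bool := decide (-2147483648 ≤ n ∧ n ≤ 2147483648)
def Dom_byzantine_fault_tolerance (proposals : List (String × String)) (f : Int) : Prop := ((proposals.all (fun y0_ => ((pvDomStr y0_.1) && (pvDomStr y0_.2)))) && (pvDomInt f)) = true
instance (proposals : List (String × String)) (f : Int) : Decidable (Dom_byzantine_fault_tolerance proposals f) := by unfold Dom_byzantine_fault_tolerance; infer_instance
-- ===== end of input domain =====

-- B replaces A's frequency dictionary + items scan by a Boyer-Moore majority vote
-- (candidate/counter pass, then one verification count); same return value, different algorithm.

-- ===== PORT A =====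
-- A's final loop: first proposal in counts.items() whose count reaches the threshold.
def pvFirstGE : List (String × Int) → Int → Option String
  | [], _ => none
  | (p, c) :: rest, t => if c ≥ t then some p else pvFirstGE rest t

def byzantine_fault_tolerance (proposals : List (String × String)) (f : Int) : Option String :=
  let d := PySem.Dict.ofList proposals
  let n : Int := d.size
  if n ≤ 3 * f then none
  else
    let counts := d.values.foldl (fun c p => c.insert p (c.getD p 0 + 1)) PySem.Dict.empty
    let threshold := n - f
    pvFirstGE counts.items threshold

-- ===== PORT B =====
-- One Boyer-Moore step: exactly Source B's loop body.
def pvBmStep (s : Option String × Int) (p : String) : Option String × Int :=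
  if s.2 == 0 then (some p, 1)
  else if s.1 == some p then (s.1, s.2 + 1)
  else (s.1, s.2 - 1)

def byzantine_fault_tolerance_alt (proposals : List (String × String)) (f : Int) : Option String :=
  let d := PySem.Dict.ofList proposals
  let n : Int := d.size
  if n ≤ 3 * f then none
  else
    let s := d.values.foldl pvBmStep (none, 0)
    match s.1 with
    | none => none
    | some cand =>
      let occ := d.values.foldl (fun a p => if p == cand then a + 1 else a) (0 : Int)
      if occ ≥ n - f then some cand else none

-- ===== PRECONDITION & SPEC =====
def Spec_byzantine_fault_tolerance (proposals : List (String × String)) (f : Int) (out : Option String) : Prop := out = byzantine_fault_tolerance_alt proposals f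
instance (proposals : List (String × String)) (f : Int) (out : Option String) : Decidable (Spec_byzantine_fault_tolerance proposals f out) := by unfold Spec_byzantine_fault_tolerance; infer_instance

-- ===== CLAIM (what is proved, stated in full; the proofs are below) =====
def Claim_equal_byzantine_fault_tolerance : Prop := ∀ (proposals : List (String × String)) (f : Int), Dom_byzantine_fault_tolerance proposals f → Spec_byzantine_fault_tolerance proposals f (byzantine_fault_tolerance proposals f)

-- ===== LEMMAS AND PROOFS =====

-- two distinct values' counts fit in the length
theorem pv_count_two_le (vs : List String) (x y : String) (hxy : x ≠ y) :
    vs.count x + vs.count y ≤ vs.length := by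
  induction vs with
  | nil => simp
  | cons a rest ih =>
    have hyx : y ≠ x := fun h => hxy h.symm
    simp only [List.count_cons, List.length_cons]
    by_cases hax : a = x <;> by_cases hay : a = y <;> simp_all <;> omega

-- find? returns the unique satisfying element
theorem pv_find?_unique {α : Type} (l : List α) (p : α → Bool) (a : α)
    (ha : a ∈ l) (hpa : p a = true) (huniq : ∀ b ∈ l, p b = true → b = a) :
    l.find? p = some a := by
  induction l with
  | nil => cases ha
  | cons b rest ih =>
    by_cases hb : p b = true
    · have hba := huniq b List.mem_cons_self hb
      subst hba
      simp [List.find?, hb]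
    · simp only [List.find?, hb]
      rcases List.mem_cons.mp ha with h | h
      · exact absurd (h ▸ hpa) hb
      · exact ih h (fun c hc => huniq c (List.mem_cons_of_mem _ hc))

-- A's item scan over a mapped list is a find? over the keys
theorem pv_firstGE_map (l : List String) (g : String → Int) (t : Int) :
    pvFirstGE (l.map fun k => (k, g k)) t = l.find? (fun k => decide (t ≤ g k)) := by
  induction l with
  | nil => rfl
  | cons k rest ih =>
    simp only [List.map_cons, pvFirstGE, List.find?]
    by_cases h : t ≤ g k <;> simp [h, ih]

-- Boyer-Moore invariant: value of the potential function along the fold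
theorem pv_bm_inv (vs : List String) (c0 : Option String) (v0 : Int) (hv : 0 ≤ v0) (x : String) :
    0 ≤ (vs.foldl pvBmStep (c0, v0)).2 ∧
    2 * (vs.count x : Int) ≤ vs.length +
      ((if (vs.foldl pvBmStep (c0, v0)).1 = some x then (vs.foldl pvBmStep (c0, v0)).2
        else -(vs.foldl pvBmStep (c0, v0)).2)
       - (if c0 = some x then v0 else -v0)) := by
  induction vs generalizing c0 v0 with
  | nil =>
    refine ⟨hv, ?_⟩
    simp only [List.foldl_nil, List.count_nil, List.length_nil, Nat.cast_zero]
    split <;> omega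
  | cons p rest ih =>
    simp only [List.foldl_cons, List.count_cons, List.length_cons]
    by_cases h0 : v0 = 0
    · -- votes == 0: new state (some p, 1)
      have hstep : pvBmStep (c0, v0) p = (some p, 1) := by simp [pvBmStep, h0]
      rw [hstep]
      obtain ⟨h1, h2⟩ := ih (some p) 1 (by omega) 
      refine ⟨h1, ?_⟩
      by_cases hpx : p = x <;> by_cases hcx : c0 = some x <;>
        simp only [hpx, hcx, beq_iff_eq] at * <;>
        · push_cast at *
          split at h2 <;> split <;> simp_all <;> omega
    · -- votes ≠ 0 (so > 0)
      by_cases hcp : c0 = some p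
      · have hstep : pvBmStep (c0, v0) p = (c0, v0 + 1) := by
          simp [pvBmStep, h0, hcp]
        rw [hstep]
        obtain ⟨h1, h2⟩ := ih c0 (v0 + 1) (by omega)
        refine ⟨h1, ?_⟩
        by_cases hpx : p = x <;> by_cases hcx : c0 = some x <;>
          simp only [hpx, hcx, beq_iff_eq] at * <;>
          · push_cast at *
            split at h2 <;> split <;> simp_all <;> omega
      · have hstep : pvBmStep (c0, v0) p = (c0, v0 - 1) := by
          simp [pvBmStep, h0, hcp]
        rw [hstep]
        obtain ⟨h1, h2⟩ := ih c0 (v0 - 1) (by omega)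
        refine ⟨h1, ?_⟩
        by_cases hpx : p = x <;> by_cases hcx : c0 = some x <;>
          simp only [hpx, hcx, beq_iff_eq] at * <;>
          · push_cast at *
            split at h2 <;> split <;> simp_all <;> omega

-- a strict majority element is the Boyer-Moore candidate
theorem pv_bm_majority (vs : List String) (x : String)
    (h : (vs.length : Int) < 2 * (vs.count x : Int)) :
    (vs.foldl pvBmStep (none, 0)).1 = some x := by
  obtain ⟨h1, h2⟩ := pv_bm_inv vs none 0 le_rfl x
  by_contra hne
  rw [if_neg hne] at h2
  rw [if_neg (by simp)] at h2
  omega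

-- the core equivalence after the guard, over the shared values list
theorem pv_core (vs : List String) (t : Int) (ht : (vs.length : Int) < 2 * t) :
    pvFirstGE ((vs.foldl (fun c p => c.insert p (c.getD p 0 + 1)) PySem.Dict.empty).items) t
      = (match (vs.foldl pvBmStep (none, 0)).1 with
         | none => none
         | some cand =>
             if (vs.foldl (fun a p => if p == cand then a + 1 else a) (0 : Int)) ≥ t then some cand
             else none) := by
  have ht1 : 1 ≤ t := by
    have : (0 : Int) ≤ vs.length := by positivity
    omega
  rw [PySem.Dict.foldl_insert_getD_add_one_eq_counter, PySem.Dict.items_counter,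
      pv_firstGE_map]
  by_cases hex : ∃ x, x ∈ vs ∧ t ≤ (vs.count x : Int)
  · obtain ⟨x, hxmem, hxcnt⟩ := hex
    -- A side: find? finds exactly x
    have hA : (PySem.Set.ofList vs).find? (fun k => decide (t ≤ (vs.count k : Int))) = some x := by
      apply pv_find?_unique
      · rw [← PySem.List.dedup_eq_ofList]; exact (PySem.List.mem_dedup _ _).mpr hxmem
      · simpa using hxcnt
      · intro y _ hy
        simp only [decide_eq_true_eq] at hy
        by_contra hyx
        have := pv_count_two_le vs x y (fun h => hyx (h ▸ rfl))
        omega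
    rw [hA]
    -- B side
    have hmaj : (vs.length : Int) < 2 * (vs.count x : Int) := by omega
    rw [pv_bm_majority vs x hmaj]
    simp only [PySem.List.foldl_beq_add_one, zero_add, ge_iff_le]
    rw [if_pos (by exact_mod_cast hxcnt)]
  · push Not at hex
    -- A side: nothing qualifies
    have hA : (PySem.Set.ofList vs).find? (fun k => decide (t ≤ (vs.count k : Int))) = none := by
      rw [List.find?_eq_none]
      intro y hy
      simp only [decide_eq_true_eq, not_le]
      have hymem : y ∈ vs := by
        rw [← PySem.List.dedup_eq_ofList] at hy
        exact (PySem.List.mem_dedup _ _).mp hy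
      exact hex y hymem
    rw [hA]
    cases hc : (vs.foldl pvBmStep (none, 0)).1 with
    | none => rfl
    | some cand =>
      simp only [PySem.List.foldl_beq_add_one, zero_add, ge_iff_le]
      rw [if_neg]
      by_cases hm : cand ∈ vs
      · exact not_le.mpr (hex cand hm)
      · have : vs.count cand = 0 := List.count_eq_zero.mpr hm
        rw [this]; push_cast; omega

-- ===== VERDICT (by name: the statement is the Claim_ definition above) =====
theorem byzantine_fault_tolerance_spec : Claim_equal_byzantine_fault_tolerance := by
  intro proposals f _
  unfold Spec_byzantine_fault_tolerance byzantine_fault_tolerance byzantine_fault_tolerance_alt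
  set d := PySem.Dict.ofList proposals with hd
  by_cases hg : (d.size : Int) ≤ 3 * f
  · simp [hg]
  · simp only [if_neg hg]
    have hlen : ((d.values).length : Int) = (d.size : Int) := by
      simp [PySem.Dict.values, PySem.Dict.size]
    have ht : ((d.values).length : Int) < 2 * ((d.size : Int) - f) := by
      have hnn : (0 : Int) ≤ (d.size : Int) := by positivity
      rw [hlen]; omega
    have := pv_core d.values ((d.size : Int) - f) ht
    simpa using this
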